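-- pv_equiv track=rewrite | github.com/CALM-LMU/YeastMateBackend | utils.py | get_detection_mask_channel_vars
-- ===== SOURCE A (Python) =====
-- def get_detection_mask_channel_vars(channels):
--     channel_order = [0, 1, 2]
--     for idx, ch in enumerate(channels):
--         if ch['Type'] == 'DIC':
--             channel_order[0] = idx
--         elif ch['Type'] == 'Red':
--             channel_order[1] = idx
--         elif ch['Type'] == 'Green':
--             channel_order[2] = idx
--
--     return channel_order
-- ===== SOURCE B (Python) =====
-- def get_detection_mask_channel_vars(channels):
--     def slot(name, default):
--         # search backwards for the most recent channel of this type
--         for idx in range(len(channels) - 1, -1, -1):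
--             if channels[idx]['Type'] == name:
--                 return idx
--         return default
--     return [slot('DIC', 0), slot('Red', 1), slot('Green', 2)]
-- ===== Notes on version B (the rewrite author's own statement) =====
-- stated objective: alternative
-- what changed: Replaces A's single forward pass that mutates a 3-slot array via a three-way branch with three independent backward searches (first match from the end, early return) per fixed slot; correct because A's last assignment to a slot is exactly the last occurrence of that type.
import Mathlib
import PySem

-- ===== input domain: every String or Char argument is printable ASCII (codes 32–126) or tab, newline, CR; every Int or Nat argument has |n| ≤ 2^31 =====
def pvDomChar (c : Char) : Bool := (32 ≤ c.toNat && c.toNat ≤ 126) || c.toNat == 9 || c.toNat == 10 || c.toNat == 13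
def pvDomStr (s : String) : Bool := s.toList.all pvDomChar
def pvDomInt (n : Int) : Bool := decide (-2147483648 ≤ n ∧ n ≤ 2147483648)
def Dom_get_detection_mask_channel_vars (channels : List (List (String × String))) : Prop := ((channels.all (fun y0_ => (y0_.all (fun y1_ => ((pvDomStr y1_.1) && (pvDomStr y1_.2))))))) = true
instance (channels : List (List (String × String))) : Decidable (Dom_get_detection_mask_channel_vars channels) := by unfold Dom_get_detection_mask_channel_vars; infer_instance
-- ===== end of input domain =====

-- B replaces A's single forward pass mutating a 3-slot array with three independent
-- backward searches (first match from the end, with the slot's default), an alternative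
-- decomposition of the same O(n) task.


-- ===== PORT A =====
-- ch['Type']: first-match association-list lookup; Pre_ guarantees the key is present,
-- so the "" default is never read on admitted inputs (in Python a missing key raises KeyError).
def pvTypeOf (ch : List (String × String)) : String :=
  ((ch.find? (fun p => p.1 == "Type")).map Prod.snd).getD ""

-- the for-loop over enumerate(channels), channel_order threaded as the list state
def pvLoopA : List (Int × List (String × String)) → List Int → List Int
  | [], order => order
  | (idx, ch) :: rest, order =>
      pvLoopA rest
        (if pvTypeOf ch = "DIC" then order.set 0 idx
         else if pvTypeOf ch = "Red" then order.set 1 idx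
         else if pvTypeOf ch = "Green" then order.set 2 idx
         else order)

def get_detection_mask_channel_vars (channels : List (List (String × String))) : List Int :=
  pvLoopA (PySem.List.enumerate channels) [0, 1, 2]

-- ===== PORT B =====
-- slot(name, default): the backward for-loop with early return; ported as a first-match
-- scan over the reversed enumerated list (range(len-1,-1,-1) visits exactly these indices).
def pvFindIdx (name : String) : List (Int × List (String × String)) → Option Int
  | [] => none
  | (idx, ch) :: rest => if pvTypeOf ch = name then some idx else pvFindIdx name rest

def pvSlot (channels : List (List (String × String))) (name : String) (default : Int) : Int :=
  (pvFindIdx name (PySem.List.enumerate channels).reverse).getD default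

def get_detection_mask_channel_vars_alt (channels : List (List (String × String))) : List Int :=
  [pvSlot channels "DIC" 0, pvSlot channels "Red" 1, pvSlot channels "Green" 2]

-- ===== PRECONDITION & SPEC =====
-- Pre_ excludes exactly the inputs where ch['Type'] raises KeyError in Python (both A and B raise there).
def Pre_get_detection_mask_channel_vars (channels : List (List (String × String))) : Prop :=
  ∀ ch ∈ channels, "Type" ∈ ch.map Prod.fst
instance (channels : List (List (String × String))) : Decidable (Pre_get_detection_mask_channel_vars channels) := by unfold Pre_get_detection_mask_channel_vars; infer_instance
def pvWitness_get_detection_mask_channel_vars : (List (List (String × String))) := [[("Type", "Red")], [("Type", "DIC")]]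

def Spec_get_detection_mask_channel_vars (channels : List (List (String × String))) (out : List Int) : Prop := out = get_detection_mask_channel_vars_alt channels
instance (channels : List (List (String × String))) (out : List Int) : Decidable (Spec_get_detection_mask_channel_vars channels out) := by unfold Spec_get_detection_mask_channel_vars; infer_instance

-- ===== CLAIM (what is proved, stated in full; the proofs are below) =====
def Claim_equal_get_detection_mask_channel_vars : Prop := ∀ (channels : List (List (String × String))), Dom_get_detection_mask_channel_vars channels → Pre_get_detection_mask_channel_vars channels → Spec_get_detection_mask_channel_vars channels (get_detection_mask_channel_vars channels)

-- ===== LEMMAS AND PROOFS =====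

-- last index at which a channel of Type t occurs in the (already enumerated) list
def pvLastIdx (t : String) : List (Int × List (String × String)) → Option Int
  | [] => none
  | (idx, ch) :: rest =>
      (pvLastIdx t rest).or (if pvTypeOf ch = t then some idx else none)

theorem pvOr_ite_getD (o : Option Int) (p : Prop) [Decidable p] (i v : Int) :
    (o.or (if p then some i else none)).getD v = o.getD (if p then i else v) := by
  cases o <;> split_ifs <;> simp

theorem pvLoopA_eq (L : List (Int × List (String × String))) :
    ∀ a b c : Int, pvLoopA L [a, b, c] =
      [(pvLastIdx "DIC" L).getD a, (pvLastIdx "Red" L).getD b, (pvLastIdx "Green" L).getD c] := by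
  induction L with
  | nil => intro a b c; simp [pvLoopA, pvLastIdx]
  | cons hd tl ih =>
    intro a b c
    obtain ⟨idx, ch⟩ := hd
    simp only [pvLoopA, pvLastIdx, pvOr_ite_getD]
    split_ifs with h1 h2 h3 <;> simp_all [List.set]

theorem pvFindIdx_append (t : String) (L M : List (Int × List (String × String))) :
    pvFindIdx t (L ++ M) = (pvFindIdx t L).or (pvFindIdx t M) := by
  induction L with
  | nil => simp [pvFindIdx]
  | cons hd tl ih =>
    obtain ⟨idx, ch⟩ := hd
    simp only [List.cons_append, pvFindIdx, ih]
    split_ifs <;> simp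

theorem pvFindIdx_reverse (t : String) (L : List (Int × List (String × String))) :
    pvFindIdx t L.reverse = pvLastIdx t L := by
  induction L with
  | nil => simp [pvFindIdx, pvLastIdx]
  | cons hd tl ih =>
    obtain ⟨idx, ch⟩ := hd
    simp [pvLastIdx, pvFindIdx_append, pvFindIdx, ih]

-- ===== VERDICT (by name: the statement is the Claim_ definition above) =====
theorem get_detection_mask_channel_vars_spec : Claim_equal_get_detection_mask_channel_vars := by
  intro channels _ _
  unfold Spec_get_detection_mask_channel_vars
  unfold get_detection_mask_channel_vars get_detection_mask_channel_vars_alt pvSlot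
  simp [pvLoopA_eq, pvFindIdx_reverse]
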